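-- pv_equiv track=rewrite | github.com/paiml/depyler | examples/hard_lang_tokenizer.py | tokenize_full
-- ===== SOURCE A (Python) =====
-- from typing import List, Tuple
--
-- def char_class(c: int) -> int:
--     if c >= 48 and c <= 57:
--         return 1
--     if (c >= 65 and c <= 90) or (c >= 97 and c <= 122) or c == 95:
--         return 2
--     if c == 32 or c == 9 or c == 10:
--         return 0
--     return 3
--
-- def scan_string(src: List[int], pos: int, quote: int) -> Tuple[List[int], int]:
--     chars: List[int] = []
--     pos = pos + 1
--     while pos < len(src) and src[pos] != quote:
--         if src[pos] == 92 and pos + 1 < len(src):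
--             pos = pos + 1
--         chars.append(src[pos])
--         pos = pos + 1
--     if pos < len(src):
--         pos = pos + 1
--     return (chars, pos)
--
-- def scan_number(src: List[int], pos: int) -> Tuple[int, int]:
--     val: int = 0
--     while pos < len(src) and src[pos] >= 48 and src[pos] <= 57:
--         val = val * 10 + src[pos] - 48
--         pos = pos + 1
--     return (val, pos)
--
-- def scan_word(src: List[int], pos: int) -> Tuple[int, int]:
--     start: int = pos
--     while pos < len(src) and char_class(src[pos]) >= 1 and char_class(src[pos]) <= 2:
--         pos = pos + 1
--     return (pos - start, pos)
--
-- def tokenize_full(src: List[int]) -> List[Tuple[int, int]]: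
--     tokens: List[Tuple[int, int]] = []
--     pos: int = 0
--     while pos < len(src):
--         cc: int = char_class(src[pos])
--         if cc == 0:
--             pos = pos + 1
--         elif cc == 1:
--             r: Tuple[int, int] = scan_number(src, pos)
--             tokens.append((1, r[0]))
--             pos = r[1]
--         elif cc == 2:
--             r2: Tuple[int, int] = scan_word(src, pos)
--             tokens.append((2, r2[0]))
--             pos = r2[1]
--         elif src[pos] == 34 or src[pos] == 39:
--             r3: Tuple[List[int], int] = scan_string(src, pos, src[pos])
--             tokens.append((3, len(r3[0])))
--             pos = r3[1]
--         else:
--             tokens.append((4, src[pos]))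
--             pos = pos + 1
--     return tokens
-- ===== SOURCE B (Python) =====
-- def char_class(c: int) -> int:
--     if c >= 48 and c <= 57:
--         return 1
--     if (c >= 65 and c <= 90) or (c >= 97 and c <= 122) or c == 95:
--         return 2
--     if c == 32 or c == 9 or c == 10:
--         return 0
--     return 3
--
--
-- def tokenize_full(src):
--     # Single-pass explicit finite-state machine: one loop, one index, a state
--     # tag plus an accumulator, instead of dispatching to sub-scanner helpers.
--     tokens = []
--     pos = 0
--     n = len(src)
--     state = 0  # 0 idle, 1 number, 2 word, 3 string
--     val = 0
--     quote = 0
--     while pos < n: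
--         c = src[pos]
--         if state == 0:
--             cc = char_class(c)
--             if cc == 0:
--                 pos += 1
--             elif cc == 1:
--                 val = c - 48
--                 state = 1
--                 pos += 1
--             elif cc == 2:
--                 val = 1
--                 state = 2
--                 pos += 1
--             elif c == 34 or c == 39:
--                 quote = c
--                 val = 0
--                 state = 3
--                 pos += 1
--             else:
--                 tokens.append((4, c))
--                 pos += 1
--         elif state == 1:
--             if 48 <= c <= 57:
--                 val = val * 10 + c - 48
--                 pos += 1
--             else:
--                 tokens.append((1, val))
--                 state = 0
--         elif state == 2:
--             if 1 <= char_class(c) <= 2: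
--                 val += 1
--                 pos += 1
--             else:
--                 tokens.append((2, val))
--                 state = 0
--         else:
--             if c == quote:
--                 tokens.append((3, val))
--                 state = 0
--                 pos += 1
--             elif c == 92 and pos + 1 < n:
--                 val += 1
--                 pos += 2
--             else:
--                 val += 1
--                 pos += 1
--     if state == 1:
--         tokens.append((1, val))
--     elif state == 2:
--         tokens.append((2, val))
--     elif state == 3:
--         tokens.append((3, val))
--     return tokens
-- ===== Notes on version B (the rewrite author's own statement) =====
-- stated objective: alternative
-- what changed: Replaces the helper-dispatch tokenizer (main loop calling scan_number/scan_word/scan_string sub-scanners) with a single-loop explicit finite state machine that keeps a state tag and one accumulator and re-dispatches the breaking character without advancing.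
import Mathlib
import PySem

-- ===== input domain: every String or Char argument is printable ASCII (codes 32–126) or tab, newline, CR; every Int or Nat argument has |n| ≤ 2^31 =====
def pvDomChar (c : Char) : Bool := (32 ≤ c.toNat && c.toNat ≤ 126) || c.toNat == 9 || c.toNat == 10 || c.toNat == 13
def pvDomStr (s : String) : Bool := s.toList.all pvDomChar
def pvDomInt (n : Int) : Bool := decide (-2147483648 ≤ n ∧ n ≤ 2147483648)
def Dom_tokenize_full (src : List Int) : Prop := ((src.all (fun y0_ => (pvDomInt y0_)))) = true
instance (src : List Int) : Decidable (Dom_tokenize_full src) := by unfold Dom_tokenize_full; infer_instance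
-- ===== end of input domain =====

-- B rewrites the helper-dispatch tokenizer as a single-loop finite state machine (objective: alternative decomposition, same cost).
-- All list indices used by either program are in range, so indexing is ported with List.getD (exact here).
-- Each Python while-loop is ported with a structural fuel parameter initialised to an exact bound on the remaining
-- iterations, so every loop computes exactly what its Python loop computes (the 0-fuel branch is never reached;
-- the one-step unfolding lemmas *_eq below prove it).

-- ===== PORT A =====
def char_class (c : Int) : Int :=
  if c ≥ 48 ∧ c ≤ 57 then 1
  else if (c ≥ 65 ∧ c ≤ 90) ∨ (c ≥ 97 ∧ c ≤ 122) ∨ c = 95 then 2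
  else if c = 32 ∨ c = 9 ∨ c = 10 then 0
  else 3

-- the while-loop of scan_string (its `pos += 1` escape step inlined into each branch),
-- fused with the trailing `if pos < len(src): pos += 1`
def scanStringGo (src : List Int) (quote : Int) : Nat → List Int → Nat → List Int × Nat
  | 0, chars, pos => (chars, pos)
  | fuel + 1, chars, pos =>
    if pos < src.length then
      if src.getD pos 0 ≠ quote then
        if src.getD pos 0 = 92 ∧ pos + 1 < src.length then
          scanStringGo src quote fuel (chars ++ [src.getD (pos + 1) 0]) (pos + 2)
        else
          scanStringGo src quote fuel (chars ++ [src.getD pos 0]) (pos + 1)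
      else (chars, pos + 1)
    else (chars, pos)

def scanStringLoop (src : List Int) (quote : Int) (chars : List Int) (pos : Nat) : List Int × Nat :=
  scanStringGo src quote (src.length - pos) chars pos

def scan_string (src : List Int) (pos : Nat) (quote : Int) : List Int × Nat :=
  scanStringLoop src quote [] (pos + 1)

def scanNumberGo (src : List Int) : Nat → Int → Nat → Int × Nat
  | 0, val, pos => (val, pos)
  | fuel + 1, val, pos =>
    if pos < src.length ∧ src.getD pos 0 ≥ 48 ∧ src.getD pos 0 ≤ 57 then
      scanNumberGo src fuel (val * 10 + src.getD pos 0 - 48) (pos + 1)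
    else (val, pos)

def scanNumberLoop (src : List Int) (val : Int) (pos : Nat) : Int × Nat :=
  scanNumberGo src (src.length - pos) val pos

def scan_number (src : List Int) (pos : Nat) : Int × Nat :=
  scanNumberLoop src 0 pos

def scanWordGo (src : List Int) : Nat → Nat → Nat
  | 0, pos => pos
  | fuel + 1, pos =>
    if pos < src.length ∧ char_class (src.getD pos 0) ≥ 1 ∧ char_class (src.getD pos 0) ≤ 2 then
      scanWordGo src fuel (pos + 1)
    else pos

def scanWordLoop (src : List Int) (pos : Nat) : Nat :=
  scanWordGo src (src.length - pos) pos

def scan_word (src : List Int) (pos : Nat) : Int × Nat :=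
  let p := scanWordLoop src pos
  ((p : Int) - (pos : Int), p)

def tokLoopGo (src : List Int) : Nat → Nat → List (Int × Int)
  | 0, _ => []
  | fuel + 1, pos =>
    if pos < src.length then
      let c := src.getD pos 0
      let cc := char_class c
      if cc = 0 then tokLoopGo src fuel (pos + 1)
      else if cc = 1 then
        let r := scan_number src pos
        (1, r.1) :: tokLoopGo src fuel r.2
      else if cc = 2 then
        let r2 := scan_word src pos
        (2, r2.1) :: tokLoopGo src fuel r2.2
      else if c = 34 ∨ c = 39 then
        let r3 := scan_string src pos c
        (3, (r3.1.length : Int)) :: tokLoopGo src fuel r3.2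
      else (4, c) :: tokLoopGo src fuel (pos + 1)
    else []

def tokLoopA (src : List Int) (pos : Nat) : List (Int × Int) :=
  tokLoopGo src (src.length - pos) pos

def tokenize_full (src : List Int) : List (Int × Int) :=
  tokLoopA src 0

-- ===== PORT B =====
inductive TState : Type where
  | idle : TState
  | num : Int → TState          -- state 1, with the numeric value accumulator
  | word : Int → TState         -- state 2, with the length accumulator
  | str : Int → Int → TState    -- state 3, with the active quote and length accumulator
deriving Repr, DecidableEq

def fsmGo (src : List Int) : Nat → Nat → TState → List (Int × Int)
  | 0, _, st =>
    match st with
    | .idle => []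
    | .num val => [(1, val)]
    | .word m => [(2, m)]
    | .str _ m => [(3, m)]
  | fuel + 1, pos, st =>
    if pos < src.length then
      let c := src.getD pos 0
      match st with
      | .idle =>
        let cc := char_class c
        if cc = 0 then fsmGo src fuel (pos + 1) .idle
        else if cc = 1 then fsmGo src fuel (pos + 1) (.num (c - 48))
        else if cc = 2 then fsmGo src fuel (pos + 1) (.word 1)
        else if c = 34 ∨ c = 39 then fsmGo src fuel (pos + 1) (.str c 0)
        else (4, c) :: fsmGo src fuel (pos + 1) .idle
      | .num val =>
        if 48 ≤ c ∧ c ≤ 57 then fsmGo src fuel (pos + 1) (.num (val * 10 + c - 48))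
        else (1, val) :: fsmGo src fuel pos .idle
      | .word m =>
        if 1 ≤ char_class c ∧ char_class c ≤ 2 then fsmGo src fuel (pos + 1) (.word (m + 1))
        else (2, m) :: fsmGo src fuel pos .idle
      | .str q m =>
        if c = q then (3, m) :: fsmGo src fuel (pos + 1) .idle
        else if c = 92 ∧ pos + 1 < src.length then fsmGo src fuel (pos + 2) (.str q (m + 1))
        else fsmGo src fuel (pos + 1) (.str q (m + 1))
    else
      match st with
      | .idle => []
      | .num val => [(1, val)]
      | .word m => [(2, m)]
      | .str _ m => [(3, m)]

def fsmWeight (st : TState) : Nat :=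
  match st with
  | .idle => 0
  | _ => 1

def fsm (src : List Int) (pos : Nat) (st : TState) : List (Int × Int) :=
  fsmGo src ((src.length - pos) * 2 + fsmWeight st) pos st

def tokenize_full_alt (src : List Int) : List (Int × Int) :=
  fsm src 0 .idle

-- ===== PRECONDITION & SPEC =====
def Spec_tokenize_full (src : List Int) (out : List (Int × Int)) : Prop := out = tokenize_full_alt src
instance (src : List Int) (out : List (Int × Int)) : Decidable (Spec_tokenize_full src out) := by unfold Spec_tokenize_full; infer_instance

-- ===== CLAIM (what is proved, stated in full; the proofs are below) =====
def Claim_equal_tokenize_full : Prop := ∀ (src : List Int), Dom_tokenize_full src → Spec_tokenize_full src (tokenize_full src)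

-- ===== LEMMAS AND PROOFS =====

theorem char_class_one_iff (c : Int) : char_class c = 1 ↔ (48 ≤ c ∧ c ≤ 57) := by
  unfold char_class; split_ifs <;> omega

-- fuel adequacy: with fuel ≥ the remaining length, each Go computes its Loop's value

theorem scanNumberGo_eq (src : List Int) :
    ∀ (f : Nat) (val : Int) (pos : Nat), src.length - pos ≤ f →
      scanNumberGo src f val pos = scanNumberLoop src val pos := by
  intro f
  induction f using Nat.strong_induction_on with
  | _ f IH =>
  intro val pos h
  cases f with
  | zero =>
    rw [scanNumberLoop, show src.length - pos = 0 by omega]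
  | succ k =>
    rw [scanNumberLoop]
    by_cases hc : pos < src.length ∧ src.getD pos 0 ≥ 48 ∧ src.getD pos 0 ≤ 57
    · rw [show src.length - pos = (src.length - (pos + 1)) + 1 by omega]
      simp only [scanNumberGo, if_pos hc]
      rw [IH k (by omega) _ (pos + 1) (by omega),
        IH (src.length - (pos + 1)) (by omega) _ (pos + 1) (le_refl _)]
    · cases hL : src.length - pos with
      | zero => simp only [scanNumberGo]; rw [if_neg hc]
      | succ m => simp only [scanNumberGo]; rw [if_neg hc, if_neg hc]

theorem scanNumberLoop_eq (src : List Int) (val : Int) (pos : Nat) :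
    scanNumberLoop src val pos =
      if pos < src.length ∧ src.getD pos 0 ≥ 48 ∧ src.getD pos 0 ≤ 57 then
        scanNumberLoop src (val * 10 + src.getD pos 0 - 48) (pos + 1)
      else (val, pos) := by
  conv_lhs => rw [scanNumberLoop]
  by_cases hc : pos < src.length ∧ src.getD pos 0 ≥ 48 ∧ src.getD pos 0 ≤ 57
  · rw [if_pos hc, show src.length - pos = (src.length - (pos + 1)) + 1 by omega]
    simp only [scanNumberGo, if_pos hc]
    exact scanNumberGo_eq src _ _ _ (le_refl _)
  · rw [if_neg hc]
    cases hL : src.length - pos with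
    | zero => simp only [scanNumberGo]
    | succ m => simp only [scanNumberGo]; rw [if_neg hc]

theorem scanWordGo_eq (src : List Int) :
    ∀ (f : Nat) (pos : Nat), src.length - pos ≤ f →
      scanWordGo src f pos = scanWordLoop src pos := by
  intro f
  induction f using Nat.strong_induction_on with
  | _ f IH =>
  intro pos h
  cases f with
  | zero =>
    rw [scanWordLoop, show src.length - pos = 0 by omega]
  | succ k =>
    rw [scanWordLoop]
    by_cases hc : pos < src.length ∧ char_class (src.getD pos 0) ≥ 1 ∧ char_class (src.getD pos 0) ≤ 2
    · rw [show src.length - pos = (src.length - (pos + 1)) + 1 by omega]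
      simp only [scanWordGo, if_pos hc]
      rw [IH k (by omega) (pos + 1) (by omega),
        IH (src.length - (pos + 1)) (by omega) (pos + 1) (le_refl _)]
    · cases hL : src.length - pos with
      | zero => simp only [scanWordGo]; rw [if_neg hc]
      | succ m => simp only [scanWordGo]; rw [if_neg hc, if_neg hc]

theorem scanWordLoop_eq (src : List Int) (pos : Nat) :
    scanWordLoop src pos =
      if pos < src.length ∧ char_class (src.getD pos 0) ≥ 1 ∧ char_class (src.getD pos 0) ≤ 2 then
        scanWordLoop src (pos + 1)
      else pos := by
  conv_lhs => rw [scanWordLoop]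
  by_cases hc : pos < src.length ∧ char_class (src.getD pos 0) ≥ 1 ∧ char_class (src.getD pos 0) ≤ 2
  · rw [if_pos hc, show src.length - pos = (src.length - (pos + 1)) + 1 by omega]
    simp only [scanWordGo, if_pos hc]
    exact scanWordGo_eq src _ _ (le_refl _)
  · rw [if_neg hc]
    cases hL : src.length - pos with
    | zero => simp only [scanWordGo]
    | succ m => simp only [scanWordGo]; rw [if_neg hc]

theorem scanStringGo_eq (src : List Int) (q : Int) :
    ∀ (f : Nat) (chars : List Int) (pos : Nat), src.length - pos ≤ f →
      scanStringGo src q f chars pos = scanStringLoop src q chars pos := by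
  intro f
  induction f using Nat.strong_induction_on with
  | _ f IH =>
  intro chars pos h
  cases f with
  | zero =>
    rw [scanStringLoop, show src.length - pos = 0 by omega]
  | succ k =>
    rw [scanStringLoop]
    by_cases hlt : pos < src.length
    · rw [show src.length - pos = (src.length - (pos + 1)) + 1 by omega]
      simp only [scanStringGo, if_pos hlt]
      by_cases hq : src.getD pos 0 ≠ q
      · rw [if_pos hq, if_pos hq]
        by_cases hesc : src.getD pos 0 = 92 ∧ pos + 1 < src.length
        · rw [if_pos hesc, if_pos hesc]
          rw [IH k (by omega) _ (pos + 2) (by omega),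
            IH (src.length - (pos + 1)) (by omega) _ (pos + 2) (by omega)]
        · rw [if_neg hesc, if_neg hesc]
          rw [IH k (by omega) _ (pos + 1) (by omega),
            IH (src.length - (pos + 1)) (by omega) _ (pos + 1) (by omega)]
      · rw [if_neg hq, if_neg hq]
    · cases hL : src.length - pos with
      | zero => simp only [scanStringGo]; rw [if_neg hlt]
      | succ m => simp only [scanStringGo]; rw [if_neg hlt, if_neg hlt]

theorem scanStringLoop_eq (src : List Int) (q : Int) (chars : List Int) (pos : Nat) :
    scanStringLoop src q chars pos =
      if pos < src.length then
        if src.getD pos 0 ≠ q then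
          if src.getD pos 0 = 92 ∧ pos + 1 < src.length then
            scanStringLoop src q (chars ++ [src.getD (pos + 1) 0]) (pos + 2)
          else
            scanStringLoop src q (chars ++ [src.getD pos 0]) (pos + 1)
        else (chars, pos + 1)
      else (chars, pos) := by
  conv_lhs => rw [scanStringLoop]
  by_cases hlt : pos < src.length
  · rw [if_pos hlt, show src.length - pos = (src.length - (pos + 1)) + 1 by omega]
    simp only [scanStringGo, if_pos hlt]
    by_cases hq : src.getD pos 0 ≠ q
    · rw [if_pos hq, if_pos hq]
      by_cases hesc : src.getD pos 0 = 92 ∧ pos + 1 < src.length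
      · rw [if_pos hesc, if_pos hesc]
        exact scanStringGo_eq src q _ _ _ (by omega)
      · rw [if_neg hesc, if_neg hesc]
        exact scanStringGo_eq src q _ _ _ (by omega)
    · rw [if_neg hq, if_neg hq]
  · rw [if_neg hlt]
    cases hL : src.length - pos with
    | zero => simp only [scanStringGo]
    | succ m => simp only [scanStringGo]; rw [if_neg hlt]

-- the scanners advance the cursor once their start condition holds

theorem scanNumberLoop_ge (src : List Int) (val : Int) (pos : Nat) :
    pos ≤ (scanNumberLoop src val pos).2 := by
  rw [scanNumberLoop]
  generalize src.length - pos = f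
  induction f generalizing val pos with
  | zero => simp [scanNumberGo]
  | succ k IH =>
    simp only [scanNumberGo]
    split
    · have := IH (val * 10 + src.getD pos 0 - 48) (pos + 1); omega
    · simp

theorem scanWordLoop_ge (src : List Int) (pos : Nat) : pos ≤ scanWordLoop src pos := by
  rw [scanWordLoop]
  generalize src.length - pos = f
  induction f generalizing pos with
  | zero => simp [scanWordGo]
  | succ k IH =>
    simp only [scanWordGo]
    split
    · have := IH (pos + 1); omega
    · omega

theorem scanStringLoop_ge (src : List Int) (q : Int) (chars : List Int) (pos : Nat) :
    pos ≤ (scanStringLoop src q chars pos).2 := by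
  rw [scanStringLoop]
  generalize src.length - pos = f
  induction f generalizing chars pos with
  | zero => simp [scanStringGo]
  | succ k IH =>
    simp only [scanStringGo]
    split
    · split
      · split
        · have := IH (chars ++ [src.getD (pos + 1) 0]) (pos + 2); omega
        · have := IH (chars ++ [src.getD pos 0]) (pos + 1); omega
      · simp
    · simp

theorem scan_number_gt (src : List Int) (pos : Nat) (hl : pos < src.length)
    (h : char_class (src.getD pos 0) = 1) : pos < (scan_number src pos).2 := by
  have hd := (char_class_one_iff _).1 h
  rw [scan_number, scanNumberLoop_eq, if_pos ⟨hl, hd.1, hd.2⟩]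
  have := scanNumberLoop_ge src (0 * 10 + src.getD pos 0 - 48) (pos + 1)
  omega

theorem scan_word_gt (src : List Int) (pos : Nat) (hl : pos < src.length)
    (h : char_class (src.getD pos 0) = 2) : pos < (scan_word src pos).2 := by
  have hsw : scanWordLoop src pos = scanWordLoop src (pos + 1) := by
    rw [scanWordLoop_eq, if_pos ⟨hl, by omega, by omega⟩]
  have hge := scanWordLoop_ge src (pos + 1)
  simp only [scan_word]
  omega

theorem scan_string_gt (src : List Int) (pos : Nat) (q : Int) :
    pos < (scan_string src pos q).2 := by
  have := scanStringLoop_ge src q [] (pos + 1)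
  rw [scan_string]; omega

theorem tokLoopGo_eq (src : List Int) :
    ∀ (f : Nat) (pos : Nat), src.length - pos ≤ f →
      tokLoopGo src f pos = tokLoopA src pos := by
  intro f
  induction f using Nat.strong_induction_on with
  | _ f IH =>
  intro pos h
  cases f with
  | zero =>
    rw [tokLoopA, show src.length - pos = 0 by omega]
  | succ k =>
    rw [tokLoopA]
    by_cases hlt : pos < src.length
    · rw [show src.length - pos = (src.length - (pos + 1)) + 1 by omega]
      simp only [tokLoopGo, if_pos hlt]
      by_cases h0 : char_class (src.getD pos 0) = 0
      · rw [if_pos h0, if_pos h0,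
          IH k (by omega) (pos + 1) (by omega),
          IH (src.length - (pos + 1)) (by omega) (pos + 1) (by omega)]
      · rw [if_neg h0, if_neg h0]
        by_cases h1 : char_class (src.getD pos 0) = 1
        · have hgt := scan_number_gt src pos hlt h1
          rw [if_pos h1, if_pos h1,
            IH k (by omega) (scan_number src pos).2 (by omega),
            IH (src.length - (pos + 1)) (by omega) (scan_number src pos).2 (by omega)]
        · rw [if_neg h1, if_neg h1]
          by_cases h2 : char_class (src.getD pos 0) = 2
          · have hgt := scan_word_gt src pos hlt h2
            rw [if_pos h2, if_pos h2,
              IH k (by omega) (scan_word src pos).2 (by omega),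
              IH (src.length - (pos + 1)) (by omega) (scan_word src pos).2 (by omega)]
          · rw [if_neg h2, if_neg h2]
            by_cases h3 : src.getD pos 0 = 34 ∨ src.getD pos 0 = 39
            · have hgt := scan_string_gt src pos (src.getD pos 0)
              rw [if_pos h3, if_pos h3,
                IH k (by omega) (scan_string src pos (src.getD pos 0)).2 (by omega),
                IH (src.length - (pos + 1)) (by omega) (scan_string src pos (src.getD pos 0)).2 (by omega)]
            · rw [if_neg h3, if_neg h3,
                IH k (by omega) (pos + 1) (by omega),
                IH (src.length - (pos + 1)) (by omega) (pos + 1) (by omega)]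
    · cases hL : src.length - pos with
      | zero => simp only [tokLoopGo]; rw [if_neg hlt]
      | succ m => simp only [tokLoopGo]; rw [if_neg hlt, if_neg hlt]

theorem tokLoopA_eq (src : List Int) (pos : Nat) :
    tokLoopA src pos =
      if pos < src.length then
        if char_class (src.getD pos 0) = 0 then tokLoopA src (pos + 1)
        else if char_class (src.getD pos 0) = 1 then
          (1, (scan_number src pos).1) :: tokLoopA src (scan_number src pos).2
        else if char_class (src.getD pos 0) = 2 then
          (2, (scan_word src pos).1) :: tokLoopA src (scan_word src pos).2
        else if src.getD pos 0 = 34 ∨ src.getD pos 0 = 39 then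
          (3, ((scan_string src pos (src.getD pos 0)).1.length : Int))
            :: tokLoopA src (scan_string src pos (src.getD pos 0)).2
        else (4, src.getD pos 0) :: tokLoopA src (pos + 1)
      else [] := by
  conv_lhs => rw [tokLoopA]
  by_cases hlt : pos < src.length
  · rw [if_pos hlt, show src.length - pos = (src.length - (pos + 1)) + 1 by omega]
    simp only [tokLoopGo, if_pos hlt]
    by_cases h0 : char_class (src.getD pos 0) = 0
    · rw [if_pos h0, if_pos h0, tokLoopGo_eq src _ _ (by omega)]
    · rw [if_neg h0, if_neg h0]
      by_cases h1 : char_class (src.getD pos 0) = 1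
      · have hgt := scan_number_gt src pos hlt h1
        rw [if_pos h1, if_pos h1, tokLoopGo_eq src _ _ (by omega)]
      · rw [if_neg h1, if_neg h1]
        by_cases h2 : char_class (src.getD pos 0) = 2
        · have hgt := scan_word_gt src pos hlt h2
          rw [if_pos h2, if_pos h2, tokLoopGo_eq src _ _ (by omega)]
        · rw [if_neg h2, if_neg h2]
          by_cases h3 : src.getD pos 0 = 34 ∨ src.getD pos 0 = 39
          · have hgt := scan_string_gt src pos (src.getD pos 0)
            rw [if_pos h3, if_pos h3, tokLoopGo_eq src _ _ (by omega)]
          · rw [if_neg h3, if_neg h3, tokLoopGo_eq src _ _ (by omega)]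
  · rw [if_neg hlt]
    cases hL : src.length - pos with
    | zero => simp only [tokLoopGo]
    | succ m => simp only [tokLoopGo]; rw [if_neg hlt]

theorem fsmGo_eq (src : List Int) :
    ∀ (f : Nat) (pos : Nat) (st : TState), (src.length - pos) * 2 + fsmWeight st ≤ f →
      fsmGo src f pos st = fsm src pos st := by
  intro f
  induction f using Nat.strong_induction_on with
  | _ f IH =>
  intro pos st h
  cases f with
  | zero =>
    rw [fsm]
    have h0 : (src.length - pos) * 2 + fsmWeight st = 0 := by omega
    rw [h0]
  | succ k =>
    rw [fsm]
    by_cases hlt : pos < src.length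
    · obtain ⟨j, hj⟩ : ∃ j, (src.length - pos) * 2 + fsmWeight st = j + 1 :=
        ⟨(src.length - pos) * 2 + fsmWeight st - 1, by cases st <;> simp only [fsmWeight] <;> omega⟩
      rw [hj]
      have hjk : j ≤ k := by omega
      cases st with
      | idle =>
        simp only [fsmWeight] at hj
        simp only [fsmGo, if_pos hlt]
        by_cases h0 : char_class (src.getD pos 0) = 0
        · rw [if_pos h0, if_pos h0,
            IH k (by omega) (pos + 1) .idle (by simp only [fsmWeight]; omega),
            IH j (by omega) (pos + 1) .idle (by simp only [fsmWeight]; omega)]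
        · rw [if_neg h0, if_neg h0]
          by_cases h1 : char_class (src.getD pos 0) = 1
          · rw [if_pos h1, if_pos h1,
              IH k (by omega) (pos + 1) _ (by simp only [fsmWeight]; omega),
              IH j (by omega) (pos + 1) _ (by simp only [fsmWeight]; omega)]
          · rw [if_neg h1, if_neg h1]
            by_cases h2 : char_class (src.getD pos 0) = 2
            · rw [if_pos h2, if_pos h2,
                IH k (by omega) (pos + 1) _ (by simp only [fsmWeight]; omega),
                IH j (by omega) (pos + 1) _ (by simp only [fsmWeight]; omega)]
            · rw [if_neg h2, if_neg h2]
              by_cases h3 : src.getD pos 0 = 34 ∨ src.getD pos 0 = 39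
              · rw [if_pos h3, if_pos h3,
                  IH k (by omega) (pos + 1) _ (by simp only [fsmWeight]; omega),
                  IH j (by omega) (pos + 1) _ (by simp only [fsmWeight]; omega)]
              · rw [if_neg h3, if_neg h3,
                  IH k (by omega) (pos + 1) .idle (by simp only [fsmWeight]; omega),
                  IH j (by omega) (pos + 1) .idle (by simp only [fsmWeight]; omega)]
      | num val =>
        simp only [fsmWeight] at hj h
        simp only [fsmGo, if_pos hlt]
        by_cases hd : 48 ≤ src.getD pos 0 ∧ src.getD pos 0 ≤ 57
        · rw [if_pos hd, if_pos hd,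
            IH k (by omega) (pos + 1) _ (by simp only [fsmWeight]; omega),
            IH j (by omega) (pos + 1) _ (by simp only [fsmWeight]; omega)]
        · rw [if_neg hd, if_neg hd,
            IH k (by omega) pos .idle (by simp only [fsmWeight]; omega),
            IH j (by omega) pos .idle (by simp only [fsmWeight]; omega)]
      | word m =>
        simp only [fsmWeight] at hj h
        simp only [fsmGo, if_pos hlt]
        by_cases hw : 1 ≤ char_class (src.getD pos 0) ∧ char_class (src.getD pos 0) ≤ 2
        · rw [if_pos hw, if_pos hw,
            IH k (by omega) (pos + 1) _ (by simp only [fsmWeight]; omega),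
            IH j (by omega) (pos + 1) _ (by simp only [fsmWeight]; omega)]
        · rw [if_neg hw, if_neg hw,
            IH k (by omega) pos .idle (by simp only [fsmWeight]; omega),
            IH j (by omega) pos .idle (by simp only [fsmWeight]; omega)]
      | str q m =>
        simp only [fsmWeight] at hj h
        simp only [fsmGo, if_pos hlt]
        by_cases hq : src.getD pos 0 = q
        · rw [if_pos hq, if_pos hq,
            IH k (by omega) (pos + 1) .idle (by simp only [fsmWeight]; omega),
            IH j (by omega) (pos + 1) .idle (by simp only [fsmWeight]; omega)]
        · rw [if_neg hq, if_neg hq]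
          by_cases hesc : src.getD pos 0 = 92 ∧ pos + 1 < src.length
          · rw [if_pos hesc, if_pos hesc,
              IH k (by omega) (pos + 2) _ (by simp only [fsmWeight]; omega),
              IH j (by omega) (pos + 2) _ (by simp only [fsmWeight]; omega)]
          · rw [if_neg hesc, if_neg hesc,
              IH k (by omega) (pos + 1) _ (by simp only [fsmWeight]; omega),
              IH j (by omega) (pos + 1) _ (by simp only [fsmWeight]; omega)]
    · have hL : src.length - pos = 0 := by omega
      rw [hL]
      cases st <;> simp [fsmGo, fsmWeight, hlt]

theorem fsm_eq (src : List Int) (pos : Nat) (st : TState) :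
    fsm src pos st =
      if pos < src.length then
        match st with
        | .idle =>
          if char_class (src.getD pos 0) = 0 then fsm src (pos + 1) .idle
          else if char_class (src.getD pos 0) = 1 then fsm src (pos + 1) (.num (src.getD pos 0 - 48))
          else if char_class (src.getD pos 0) = 2 then fsm src (pos + 1) (.word 1)
          else if src.getD pos 0 = 34 ∨ src.getD pos 0 = 39 then fsm src (pos + 1) (.str (src.getD pos 0) 0)
          else (4, src.getD pos 0) :: fsm src (pos + 1) .idle
        | .num val =>
          if 48 ≤ src.getD pos 0 ∧ src.getD pos 0 ≤ 57 then
            fsm src (pos + 1) (.num (val * 10 + src.getD pos 0 - 48))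
          else (1, val) :: fsm src pos .idle
        | .word m =>
          if 1 ≤ char_class (src.getD pos 0) ∧ char_class (src.getD pos 0) ≤ 2 then
            fsm src (pos + 1) (.word (m + 1))
          else (2, m) :: fsm src pos .idle
        | .str q m =>
          if src.getD pos 0 = q then (3, m) :: fsm src (pos + 1) .idle
          else if src.getD pos 0 = 92 ∧ pos + 1 < src.length then fsm src (pos + 2) (.str q (m + 1))
          else fsm src (pos + 1) (.str q (m + 1))
      else
        match st with
        | .idle => []
        | .num val => [(1, val)]
        | .word m => [(2, m)]
        | .str _ m => [(3, m)] := by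
  conv_lhs => rw [fsm]
  by_cases hlt : pos < src.length
  · rw [if_pos hlt]
    obtain ⟨j, hj⟩ : ∃ j, (src.length - pos) * 2 + fsmWeight st = j + 1 :=
      ⟨(src.length - pos) * 2 + fsmWeight st - 1, by cases st <;> simp only [fsmWeight] <;> omega⟩
    rw [hj]
    cases st with
    | idle =>
      simp only [fsmWeight] at hj
      simp only [fsmGo, if_pos hlt]
      by_cases h0 : char_class (src.getD pos 0) = 0
      · rw [if_pos h0, if_pos h0, fsmGo_eq src j _ _ (by simp only [fsmWeight]; omega)]
      · rw [if_neg h0, if_neg h0]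
        by_cases h1 : char_class (src.getD pos 0) = 1
        · rw [if_pos h1, if_pos h1, fsmGo_eq src j _ _ (by simp only [fsmWeight]; omega)]
        · rw [if_neg h1, if_neg h1]
          by_cases h2 : char_class (src.getD pos 0) = 2
          · rw [if_pos h2, if_pos h2, fsmGo_eq src j _ _ (by simp only [fsmWeight]; omega)]
          · rw [if_neg h2, if_neg h2]
            by_cases h3 : src.getD pos 0 = 34 ∨ src.getD pos 0 = 39
            · rw [if_pos h3, if_pos h3, fsmGo_eq src j _ _ (by simp only [fsmWeight]; omega)]
            · rw [if_neg h3, if_neg h3, fsmGo_eq src j _ _ (by simp only [fsmWeight]; omega)]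
    | num val =>
      simp only [fsmWeight] at hj
      simp only [fsmGo, if_pos hlt]
      by_cases hd : 48 ≤ src.getD pos 0 ∧ src.getD pos 0 ≤ 57
      · rw [if_pos hd, if_pos hd, fsmGo_eq src j _ _ (by simp only [fsmWeight]; omega)]
      · rw [if_neg hd, if_neg hd, fsmGo_eq src j _ _ (by simp only [fsmWeight]; omega)]
    | word m =>
      simp only [fsmWeight] at hj
      simp only [fsmGo, if_pos hlt]
      by_cases hw : 1 ≤ char_class (src.getD pos 0) ∧ char_class (src.getD pos 0) ≤ 2
      · rw [if_pos hw, if_pos hw, fsmGo_eq src j _ _ (by simp only [fsmWeight]; omega)]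
      · rw [if_neg hw, if_neg hw, fsmGo_eq src j _ _ (by simp only [fsmWeight]; omega)]
    | str q m =>
      simp only [fsmWeight] at hj
      simp only [fsmGo, if_pos hlt]
      by_cases hq : src.getD pos 0 = q
      · rw [if_pos hq, if_pos hq, fsmGo_eq src j _ _ (by simp only [fsmWeight]; omega)]
      · rw [if_neg hq, if_neg hq]
        by_cases hesc : src.getD pos 0 = 92 ∧ pos + 1 < src.length
        · rw [if_pos hesc, if_pos hesc, fsmGo_eq src j _ _ (by simp only [fsmWeight]; omega)]
        · rw [if_neg hesc, if_neg hesc, fsmGo_eq src j _ _ (by simp only [fsmWeight]; omega)]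
  · rw [if_neg hlt]
    have hL : src.length - pos = 0 := by omega
    rw [hL]
    cases st <;> simp [fsmGo, fsmWeight, hlt]

theorem fsm_combined (src : List Int) (n : Nat) :
    ∀ pos : Nat, src.length - pos = n →
      (fsm src pos .idle = tokLoopA src pos) ∧
      (∀ val : Int, fsm src pos (.num val) =
        (1, (scanNumberLoop src val pos).1) :: tokLoopA src (scanNumberLoop src val pos).2) ∧
      (∀ m : Int, fsm src pos (.word m) =
        (2, m + ((scanWordLoop src pos : Int) - (pos : Int))) :: tokLoopA src (scanWordLoop src pos)) ∧
      (∀ (q : Int) (chars : List Int), fsm src pos (.str q (chars.length : Int)) =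
        (3, ((scanStringLoop src q chars pos).1.length : Int)) :: tokLoopA src (scanStringLoop src q chars pos).2) := by
  induction n using Nat.strong_induction_on with
  | _ n IH =>
  intro pos hn
  by_cases hlt : pos < src.length
  case neg =>
    have h1 : tokLoopA src pos = [] := by rw [tokLoopA_eq]; simp [hlt]
    refine ⟨?_, ?_, ?_, ?_⟩
    · rw [fsm_eq]; simp [hlt, h1]
    · intro val
      rw [fsm_eq]
      conv_rhs => rw [scanNumberLoop_eq]
      simp [hlt, h1]
    · intro m
      rw [fsm_eq]
      conv_rhs => rw [scanWordLoop_eq]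
      simp [hlt, h1]
    · intro q chars
      rw [fsm_eq]
      conv_rhs => rw [scanStringLoop_eq]
      simp [hlt, h1]
  case pos =>
    obtain ⟨IH1, IH2, IH3, IH4⟩ := IH (src.length - (pos + 1)) (by omega) (pos + 1) rfl
    have Pidle : fsm src pos .idle = tokLoopA src pos := by
      rw [fsm_eq, tokLoopA_eq, if_pos hlt, if_pos hlt]
      dsimp only
      by_cases h0 : char_class (src.getD pos 0) = 0
      · rw [if_pos h0, if_pos h0, IH1]
      · rw [if_neg h0, if_neg h0]
        by_cases h1 : char_class (src.getD pos 0) = 1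
        · have hd := (char_class_one_iff (src.getD pos 0)).1 h1
          have hsn : scan_number src pos = scanNumberLoop src (src.getD pos 0 - 48) (pos + 1) := by
            rw [scan_number]
            conv_lhs => rw [scanNumberLoop_eq]
            rw [if_pos ⟨hlt, hd.1, hd.2⟩]
            norm_num
          rw [if_pos h1, if_pos h1, IH2, hsn]
        · rw [if_neg h1, if_neg h1]
          by_cases h2 : char_class (src.getD pos 0) = 2
          · have hsw : scanWordLoop src pos = scanWordLoop src (pos + 1) := by
              conv_lhs => rw [scanWordLoop_eq]
              rw [if_pos ⟨hlt, by omega, by omega⟩]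
            rw [if_pos h2, if_pos h2, IH3]
            simp only [scan_word, hsw]
            congr 1
            simp only [Prod.mk.injEq, true_and]
            push_cast
            ring
          · rw [if_neg h2, if_neg h2]
            by_cases h3 : src.getD pos 0 = 34 ∨ src.getD pos 0 = 39
            · have h00 := IH4 (src.getD pos 0) []
              simp only [List.length_nil, Nat.cast_zero] at h00
              rw [if_pos h3, if_pos h3, h00]
              simp only [scan_string]
            · rw [if_neg h3, if_neg h3, IH1]
    refine ⟨Pidle, ?_, ?_, ?_⟩
    · intro val
      rw [fsm_eq, if_pos hlt]
      dsimp only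
      by_cases hd : 48 ≤ src.getD pos 0 ∧ src.getD pos 0 ≤ 57
      · have hsn : scanNumberLoop src val pos
            = scanNumberLoop src (val * 10 + src.getD pos 0 - 48) (pos + 1) := by
          conv_lhs => rw [scanNumberLoop_eq]
          rw [if_pos ⟨hlt, hd.1, hd.2⟩]
        rw [if_pos hd, IH2, hsn]
      · have hsn : scanNumberLoop src val pos = (val, pos) := by
          rw [scanNumberLoop_eq, if_neg (by tauto)]
        rw [if_neg hd, Pidle, hsn]
    · intro m
      rw [fsm_eq, if_pos hlt]
      dsimp only
      by_cases hw : 1 ≤ char_class (src.getD pos 0) ∧ char_class (src.getD pos 0) ≤ 2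
      · have hsw : scanWordLoop src pos = scanWordLoop src (pos + 1) := by
          conv_lhs => rw [scanWordLoop_eq]
          rw [if_pos ⟨hlt, hw.1, hw.2⟩]
        rw [if_pos hw, IH3, hsw]
        congr 1
        simp only [Prod.mk.injEq, true_and]
        push_cast
        ring
      · have hsw : scanWordLoop src pos = pos := by
          rw [scanWordLoop_eq, if_neg (by tauto)]
        rw [if_neg hw, Pidle, hsw]
        simp
    · intro q chars
      rw [fsm_eq, if_pos hlt]
      dsimp only
      by_cases hq : src.getD pos 0 = q
      · have hss : scanStringLoop src q chars pos = (chars, pos + 1) := by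
          rw [scanStringLoop_eq, if_pos hlt, if_neg (by simpa using hq)]
        rw [if_pos hq, IH1, hss]
      · by_cases hesc : src.getD pos 0 = 92 ∧ pos + 1 < src.length
        · obtain ⟨-, -, -, IH4'⟩ := IH (src.length - (pos + 2)) (by omega) (pos + 2) rfl
          have hss : scanStringLoop src q chars pos
              = scanStringLoop src q (chars ++ [src.getD (pos + 1) 0]) (pos + 2) := by
            conv_lhs => rw [scanStringLoop_eq]
            rw [if_pos hlt, if_pos hq, if_pos hesc]
          have h4 := IH4' q (chars ++ [src.getD (pos + 1) 0])
          simp only [List.length_append, List.length_cons, List.length_nil] at h4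
          push_cast at h4
          rw [if_neg hq, if_pos hesc, h4, hss]
        · have hss : scanStringLoop src q chars pos
              = scanStringLoop src q (chars ++ [src.getD pos 0]) (pos + 1) := by
            conv_lhs => rw [scanStringLoop_eq]
            rw [if_pos hlt, if_pos hq, if_neg hesc]
          have h4 := IH4 q (chars ++ [src.getD pos 0])
          simp only [List.length_append, List.length_cons, List.length_nil] at h4
          push_cast at h4
          rw [if_neg hq, if_neg hesc, h4, hss]

-- ===== VERDICT (by name: the statement is the Claim_ definition above) =====
theorem tokenize_full_spec : Claim_equal_tokenize_full := by
  intro src _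
  unfold Spec_tokenize_full tokenize_full tokenize_full_alt
  exact ((fsm_combined src (src.length - 0) 0 rfl).1).symm
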